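-- pv_equiv track=rewrite | github.com/HopeLoom/AI-Interview | backend/core/knowledge_creator/knowledge_creator.py | merge_hyphen_lines
-- ===== SOURCE A (Python) =====
-- def merge_hyphen_lines(text):
--     lines = text.split("\n")
--     merged_lines = []
--     for line in lines:
--         # If the line ends with hyphen, merge it with the next line (if there is one)
--         if line.endswith("-") and len(merged_lines) > 0:
--             merged_lines[-1] = merged_lines[-1] + line[:-1]  # remove the hyphen and merge
--         else:
--             merged_lines.append(line)
--     return "\n".join(merged_lines)
-- ===== SOURCE B (Python) =====
-- def merge_hyphen_lines(text):
--     # One left-to-right character scan: a newline followed by a line that ends in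
--     # "-" is replaced by that line's content without the hyphen; all other
--     # characters are copied. No line list or accumulator is maintained.
--     out = []
--     i = 0
--     n = len(text)
--     while i < n:
--         if text[i] == "\n":
--             j = text.find("\n", i + 1)
--             if j == -1:
--                 j = n
--             seg = text[i + 1:j]
--             if seg.endswith("-"):
--                 out.append(seg[:-1])
--                 i = j
--                 continue
--         out.append(text[i])
--         i += 1
--     return "".join(out)
-- ===== Notes on version B (the rewrite author's own statement) =====
-- stated objective: alternative
-- what changed: Replaces A's split-into-lines / mutate-last-element accumulator loop by a single left-to-right character scan that, at each newline, splices the following line onto the preceding text when it ends in a hyphen; no line list is built.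
import Mathlib
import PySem

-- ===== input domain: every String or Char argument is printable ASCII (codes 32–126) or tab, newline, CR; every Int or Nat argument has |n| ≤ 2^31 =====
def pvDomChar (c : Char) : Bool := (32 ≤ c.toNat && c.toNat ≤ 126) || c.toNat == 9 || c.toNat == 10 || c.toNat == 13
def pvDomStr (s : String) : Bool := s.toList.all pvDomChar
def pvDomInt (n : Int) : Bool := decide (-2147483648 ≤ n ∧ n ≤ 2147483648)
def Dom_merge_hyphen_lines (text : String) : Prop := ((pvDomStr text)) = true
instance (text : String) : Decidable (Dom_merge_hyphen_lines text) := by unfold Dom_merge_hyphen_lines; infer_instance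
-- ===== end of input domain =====

-- B replaces A's split/accumulate-lines loop by a single left-to-right character
-- scan that splices a line ending in "-" onto the text before its newline
-- (objective: alternative — one pass over characters, no line list is built).

-- ===== PORT A =====
def merge_hyphen_lines (text : String) : String :=
  match PySem.Str.split? text "\n" with
  | none => ""   -- unreachable: the separator "\n" is nonempty
  | some lines =>
    PySem.Str.join "\n" (lines.foldl (fun acc line =>
      if PySem.Str.endswith line "-" && decide (0 < acc.length) then
        -- merged_lines[-1] = merged_lines[-1] + line[:-1]
        acc.dropLast ++ [acc.getLastD "" ++ PySem.Str.slice line none (some (-1))]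
      else acc ++ [line]) [])

-- ===== PORT B =====
-- Source B's while-loop over positions, as the same recursion over the remaining
-- characters: `text.find("\n", i+1)` delimits exactly the '\n'-free run
-- `rest.takeWhile (· != '\n')`, and `i = j` is `rest.drop seg.length`.
def pvBScan : List Char → List Char
  | [] => []
  | c :: rest =>
    if c = '\n' then
      let seg := rest.takeWhile (fun x => x != '\n')
      if PySem.Chars.endswith seg ['-'] then
        seg.dropLast ++ pvBScan (rest.drop seg.length)
      else
        c :: pvBScan rest
    else c :: pvBScan rest
  termination_by cs => cs.length
  decreasing_by
    all_goals simp

def merge_hyphen_lines_alt (text : String) : String :=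
  String.ofList (pvBScan text.toList)

-- ===== PRECONDITION & SPEC =====
def Spec_merge_hyphen_lines (text : String) (out : String) : Prop := out = merge_hyphen_lines_alt text
instance (text : String) (out : String) : Decidable (Spec_merge_hyphen_lines text out) := by unfold Spec_merge_hyphen_lines; infer_instance

-- ===== CLAIM (what is proved, stated in full; the proofs are below) =====
def Claim_equal_merge_hyphen_lines : Prop := ∀ (text : String), Dom_merge_hyphen_lines text → Spec_merge_hyphen_lines text (merge_hyphen_lines text)

-- ===== LEMMAS AND PROOFS =====

-- splitNl: a plain structural recursion computing text.split("\n") on char lists.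
def splitNl : List Char → List (List Char)
  | [] => [[]]
  | c :: rest =>
    if c = '\n' then [] :: splitNl rest
    else
      match splitNl rest with
      | [] => [[c]]
      | s :: ss => (c :: s) :: ss

def consHead (p : List Char) : List (List Char) → List (List Char)
  | [] => [p]
  | s :: ss => (p ++ s) :: ss

-- hMerge: A's fold, with the accumulator's last element made explicit.
def hMerge : List Char → List (List Char) → List (List Char)
  | last, [] => [last]
  | last, l :: ls =>
    if PySem.Chars.endswith l ['-'] then hMerge (last ++ l.dropLast) ls
    else last :: hMerge l ls

-- gTail: the common normal form of both programs on the lines after the first.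
def gTail : List (List Char) → List Char
  | [] => []
  | l :: ls =>
    if PySem.Chars.endswith l ['-'] then l.dropLast ++ gTail ls
    else '\n' :: (l ++ gTail ls)

def encodeNl (ls : List (List Char)) : List Char :=
  (ls.map (fun l => '\n' :: l)).flatten

theorem headI_cons_tail_of_ne_nil {α : Type} [Inhabited α] (l : List α) (h : l ≠ []) :
    l.headI :: l.tail = l := by
  cases l with
  | nil => exact absurd rfl h
  | cons a t => rfl

theorem splitNl_ne_nil (cs : List Char) : splitNl cs ≠ [] := by
  cases cs with
  | nil => simp [splitNl]
  | cons c rest =>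
    simp only [splitNl]
    split
    · simp
    · split <;> simp

theorem consHead_splitNl (p cs : List Char) :
    consHead p (splitNl cs) = (p ++ (splitNl cs).headI) :: (splitNl cs).tail := by
  have h := splitNl_ne_nil cs
  cases hs : splitNl cs with
  | nil => exact absurd hs h
  | cons s ss => simp [consHead]

-- one-step equations for PySem's fuel-based split loop
theorem go_nil (sep cur : List Char) (acc : List (List Char)) (fuel : Nat) :
    PySem.Chars.splitOn.go sep (fuel+1) [] cur acc = (cur.reverse :: acc).reverse := by
  rw [PySem.Chars.splitOn.go]
  omega

theorem go_cons (sep cur : List Char) (acc : List (List Char)) (fuel : Nat) (c : Char) (rest : List Char) :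
    PySem.Chars.splitOn.go sep (fuel+1) (c::rest) cur acc =
      if sep.isPrefixOf (c::rest) then PySem.Chars.splitOn.go sep fuel (List.drop sep.length (c::rest)) [] (cur.reverse :: acc)
      else PySem.Chars.splitOn.go sep fuel rest (c :: cur) acc := by
  rw [PySem.Chars.splitOn.go]

theorem splitOn_go_spec (fuel : Nat) : ∀ (l cur : List Char) (acc : List (List Char)),
    l.length < fuel →
    PySem.Chars.splitOn.go ['\n'] fuel l cur acc = acc.reverse ++ consHead cur.reverse (splitNl l) := by
  induction fuel with
  | zero => intro l cur acc h; omega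
  | succ fuel ih =>
    intro l cur acc h
    cases l with
    | nil =>
      rw [go_nil]
      simp [splitNl, consHead]
    | cons c rest =>
      rw [go_cons]
      by_cases hc : c = '\n'
      · subst hc
        have hp : List.isPrefixOf ['\n'] ('\n' :: rest) = true := by
          simp [List.isPrefixOf]
        rw [if_pos hp]
        simp only [List.length, List.drop_succ_cons, List.drop_zero]
        rw [ih rest [] (cur.reverse :: acc) (by simpa using Nat.lt_of_succ_lt_succ h)]
        rw [consHead_splitNl]
        simp [splitNl, consHead]
        exact headI_cons_tail_of_ne_nil _ (splitNl_ne_nil rest)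
      · have hp : ¬ (List.isPrefixOf ['\n'] (c :: rest) = true) := by
          simp [List.isPrefixOf]
          exact fun hh => absurd hh.symm hc
        rw [if_neg hp]
        rw [ih rest (c :: cur) acc (by simpa using Nat.lt_of_succ_lt_succ h)]
        rw [consHead_splitNl, consHead_splitNl]
        simp only [splitNl, if_neg hc]
        cases hs : splitNl rest with
        | nil => exact absurd hs (splitNl_ne_nil rest)
        | cons s ss => simp

theorem splitOn_eq_splitNl (cs : List Char) : PySem.Chars.splitOn cs ['\n'] = splitNl cs := by
  rw [PySem.Chars.splitOn, splitOn_go_spec (cs.length + 1) cs [] [] (by omega)]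
  rw [consHead_splitNl]
  have h := splitNl_ne_nil cs
  cases hs : splitNl cs with
  | nil => exact absurd hs h
  | cons s ss => simp

theorem splitNl_no_newline (cs : List Char) : ∀ l ∈ splitNl cs, ∀ x ∈ l, x ≠ '\n' := by
  induction cs with
  | nil => simp [splitNl]
  | cons c rest ih =>
    by_cases hc : c = '\n'
    · simp only [splitNl, if_pos hc]
      intro l hl
      rcases List.mem_cons.mp hl with h1 | h2
      · subst h1; simp
      · exact ih l h2
    · simp only [splitNl, if_neg hc]
      cases hs : splitNl rest with
      | nil => exact absurd hs (splitNl_ne_nil rest)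
      | cons s ss =>
        intro l hl x hx
        rcases List.mem_cons.mp hl with h1 | h2
        · subst h1
          rcases List.mem_cons.mp hx with h3 | h4
          · subst h3; exact hc
          · exact ih s (by rw [hs]; exact List.mem_cons_self ..) x h4
        · exact ih l (by rw [hs]; exact List.mem_cons_of_mem _ h2) x hx

theorem splitNl_encode : ∀ (cs first : List Char) (rest : List (List Char)),
    splitNl cs = first :: rest → cs = first ++ encodeNl rest := by
  intro cs
  induction cs with
  | nil =>
    intro first rest h
    simp [splitNl] at h
    obtain ⟨h1, h2⟩ := h
    subst h1; subst h2
    simp [encodeNl]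
  | cons c cs' ih =>
    intro first rest h
    by_cases hc : c = '\n'
    · subst hc
      simp only [splitNl, if_pos] at h
      injection h with h1 h2
      subst h1
      subst h2
      cases hstail : splitNl cs' with
      | nil => exact absurd hstail (splitNl_ne_nil cs')
      | cons s ss =>
        have hcs := ih s ss hstail
        simp [encodeNl]
        rw [hcs]
        rfl
    · simp only [splitNl, if_neg hc] at h
      cases hstail : splitNl cs' with
      | nil => exact absurd hstail (splitNl_ne_nil cs')
      | cons s ss =>
        rw [hstail] at h
        injection h with h1 h2
        subst h1
        subst h2
        have hcs := ih s ss hstail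
        simp [encodeNl] at hcs ⊢
        simpa [encodeNl] using hcs

theorem hMerge_ne_nil : ∀ (ls : List (List Char)) (last : List Char), hMerge last ls ≠ [] := by
  intro ls
  induction ls with
  | nil => intro last; simp [hMerge]
  | cons l ls ih =>
    intro last
    simp only [hMerge]
    split
    · exact ih _
    · simp

theorem foldA : ∀ (ls : List (List Char)) (init : List String) (lastS : String),
    (((ls.map String.ofList).foldl (fun acc line =>
      if PySem.Str.endswith line "-" && decide (0 < acc.length) then
        acc.dropLast ++ [acc.getLastD "" ++ PySem.Str.slice line none (some (-1))]
      else acc ++ [line]) (init ++ [lastS])).map String.toList)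
    = init.map String.toList ++ hMerge lastS.toList ls := by
  intro ls
  induction ls with
  | nil => intro init lastS; simp [hMerge]
  | cons l ls ih =>
    intro init lastS
    simp only [List.map_cons, List.foldl_cons]
    have hlen : decide (0 < (init ++ [lastS]).length) = true := by simp
    have hend : PySem.Str.endswith (String.ofList l) "-" = PySem.Chars.endswith l ['-'] := by
      rw [PySem.Str.endswith_eq, String.toList_ofList]
      rfl
    rw [hlen, hend, Bool.and_true]
    by_cases he : PySem.Chars.endswith l ['-'] = true
    · rw [if_pos he, List.dropLast_concat, List.getLastD_concat]
      rw [ih init (lastS ++ PySem.Str.slice (String.ofList l) none (some (-1)))]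
      have hsl : (lastS ++ PySem.Str.slice (String.ofList l) none (some (-1))).toList
          = lastS.toList ++ l.dropLast := by
        rw [String.toList_append, PySem.Str.slice, String.toList_ofList, String.toList_ofList,
          PySem.Chars.slice_eq_listSlice, PySem.List.slice_to_neg_one]
      rw [hsl]
      simp [hMerge, he]
    · rw [if_neg he]
      rw [show (init ++ [lastS]) ++ [String.ofList l] = (init ++ [lastS]) ++ [String.ofList l] from rfl]
      rw [ih (init ++ [lastS]) (String.ofList l)]
      simp [hMerge, he, String.toList_ofList]

theorem joinH : ∀ (ls : List (List Char)) (last : List Char),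
    PySem.Chars.join ['\n'] (hMerge last ls) = last ++ gTail ls := by
  intro ls
  induction ls with
  | nil => intro last; simp [hMerge, gTail, PySem.Chars.join_singleton]
  | cons l ls ih =>
    intro last
    simp only [hMerge, gTail]
    by_cases he : PySem.Chars.endswith l ['-'] = true
    · rw [if_pos he, if_pos he, ih, List.append_assoc]
    · rw [if_neg he, if_neg he]
      cases hm : hMerge l ls with
      | nil => exact absurd hm (hMerge_ne_nil ls l)
      | cons q qs =>
        rw [PySem.Chars.join_cons_cons, ← hm, ih]
        simp

theorem bScan_cons_ne (c : Char) (cs : List Char) (h : ¬ c = '\n') :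
    pvBScan (c :: cs) = c :: pvBScan cs := by
  rw [pvBScan]
  simp [h]

theorem bScan_append : ∀ (l t : List Char), (∀ x ∈ l, x ≠ '\n') →
    pvBScan (l ++ t) = l ++ pvBScan t := by
  intro l
  induction l with
  | nil => intro t _; simp
  | cons a l ih =>
    intro t h
    have ha : ¬ a = '\n' := h a (List.mem_cons_self ..)
    rw [List.cons_append, bScan_cons_ne a _ ha, ih t (fun x hx => h x (List.mem_cons_of_mem _ hx))]
    simp

theorem takeWhile_append_nl (l t : List Char) (h : ∀ x ∈ l, x ≠ '\n')
    (ht : t.takeWhile (fun x => x != '\n') = []) :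
    (l ++ t).takeWhile (fun x => x != '\n') = l := by
  induction l with
  | nil => simpa using ht
  | cons a l ih =>
    have ha : (a != '\n') = true := by
      simpa using h a (List.mem_cons_self ..)
    simp only [List.cons_append, List.takeWhile_cons, ha, if_pos]
    rw [ih (fun x hx => h x (List.mem_cons_of_mem _ hx))]

theorem takeWhile_encodeNl (ls : List (List Char)) :
    (encodeNl ls).takeWhile (fun x => x != '\n') = [] := by
  cases ls with
  | nil => rfl
  | cons l ls => simp [encodeNl]

theorem bScan_encode : ∀ (ls : List (List Char)), (∀ l ∈ ls, ∀ x ∈ l, x ≠ '\n') →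
    pvBScan (encodeNl ls) = gTail ls := by
  intro ls
  induction ls with
  | nil => intro _; simp [encodeNl, gTail, pvBScan]
  | cons l ls ih =>
    intro h
    have hl : ∀ x ∈ l, x ≠ '\n' := h l (List.mem_cons_self ..)
    have henc : encodeNl (l :: ls) = '\n' :: (l ++ encodeNl ls) := by simp [encodeNl]
    rw [henc, pvBScan]
    simp only [if_true]
    have hseg : (l ++ encodeNl ls).takeWhile (fun x => x != '\n') = l :=
      takeWhile_append_nl l _ hl (takeWhile_encodeNl ls)
    rw [hseg]
    have hdrop : (l ++ encodeNl ls).drop l.length = encodeNl ls := List.drop_left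
    rw [hdrop]
    by_cases he : PySem.Chars.endswith l ['-'] = true
    · rw [if_pos he, ih (fun p hp => h p (List.mem_cons_of_mem _ hp))]
      simp [gTail, he]
    · rw [if_neg he, bScan_append l _ hl, ih (fun p hp => h p (List.mem_cons_of_mem _ hp))]
      simp [gTail, he]

theorem A_toList (text : String) (first : List Char) (rest : List (List Char))
    (hs : splitNl text.toList = first :: rest) :
    (merge_hyphen_lines text).toList = PySem.Chars.join ['\n'] (hMerge first rest) := by
  unfold merge_hyphen_lines
  have hsplit : PySem.Str.split? text "\n" = some ((splitNl text.toList).map String.ofList) := by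
    rw [PySem.Str.split?, PySem.Chars.split?]
    have hnl : ("\n".toList) = ['\n'] := rfl
    simp [hnl, splitOn_eq_splitNl]
  rw [hsplit, hs]
  simp only [List.map_cons, List.foldl_cons]
  have hfalse : (PySem.Str.endswith (String.ofList first) "-" && decide (0 < ([] : List String).length)) = false := by
    simp
  rw [hfalse]
  simp only [Bool.false_eq_true, List.nil_append]
  rw [PySem.Str.toList_join]
  have h2 := foldA rest [] (String.ofList first)
  simp only [List.nil_append, String.toList_ofList] at h2
  rw [show ("\n".toList) = ['\n'] from rfl]
  exact congrArg (PySem.Chars.join ['\n']) h2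

theorem B_toList (text : String) :
    (merge_hyphen_lines_alt text).toList = pvBScan text.toList := by
  simp [merge_hyphen_lines_alt, String.toList_ofList]

-- ===== VERDICT (by name: the statement is the Claim_ definition above) =====
theorem merge_hyphen_lines_spec : Claim_equal_merge_hyphen_lines := by
  intro text _
  unfold Spec_merge_hyphen_lines
  apply String.toList_inj.mp
  cases hs : splitNl text.toList with
  | nil => exact absurd hs (splitNl_ne_nil text.toList)
  | cons first rest =>
    rw [A_toList text first rest hs, B_toList, joinH]
    rw [splitNl_encode text.toList first rest hs]
    have hfirst : ∀ x ∈ first, x ≠ '\n' :=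
      splitNl_no_newline text.toList first (by rw [hs]; exact List.mem_cons_self ..)
    rw [bScan_append first _ hfirst]
    rw [bScan_encode rest (fun l hl => splitNl_no_newline text.toList l
      (by rw [hs]; exact List.mem_cons_of_mem _ hl))]
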